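-- pv_equiv track=rewrite | github.com/todorescu-diana/beat_tracking_v2 | utils/utils.py | sum_continuous_true_segments
-- ===== SOURCE A (Python) =====
-- def sum_continuous_true_segments(lst):
--     continuous_sum = 0  # initialize the sum of continuous True segments
--     current_segment_length = 0  # initialize the length of the current True segment
--
--     for item in lst:
--         if item:  # if the current item is True
--             current_segment_length += 1  # Increment the length of the current segment
--         else:  # if the current item is False
--             if current_segment_length > 1:  # if the current segment length is greater than 1
--                 continuous_sum += current_segment_length  # add the current segment length to the continuous sum
--             current_segment_length = 0  # reset the current segment length
--
--     # check if there's an unprocessed segment at the end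
--     if current_segment_length > 1:
--         continuous_sum += current_segment_length
--
--     return continuous_sum
-- ===== SOURCE B (Python) =====
-- def sum_continuous_true_segments(lst):
--     # run-splitting two-pointer scan: find each maximal True run and add its length if > 1
--     total = 0
--     i = 0
--     n = len(lst)
--     while i < n:
--         if not lst[i]:
--             i += 1
--         else:
--             j = i + 1
--             while j < n and lst[j]:
--                 j += 1
--             if j - i > 1:
--                 total += j - i
--             i = j
--     return total
-- ===== Notes on version B (the rewrite author's own statement) =====
-- stated objective: alternative
-- what changed: Replaces A's per-item state machine (running segment length flushed on False and at the end) with a two-pointer scan that locates each maximal True run directly and adds its length when it exceeds 1.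
import Mathlib
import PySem

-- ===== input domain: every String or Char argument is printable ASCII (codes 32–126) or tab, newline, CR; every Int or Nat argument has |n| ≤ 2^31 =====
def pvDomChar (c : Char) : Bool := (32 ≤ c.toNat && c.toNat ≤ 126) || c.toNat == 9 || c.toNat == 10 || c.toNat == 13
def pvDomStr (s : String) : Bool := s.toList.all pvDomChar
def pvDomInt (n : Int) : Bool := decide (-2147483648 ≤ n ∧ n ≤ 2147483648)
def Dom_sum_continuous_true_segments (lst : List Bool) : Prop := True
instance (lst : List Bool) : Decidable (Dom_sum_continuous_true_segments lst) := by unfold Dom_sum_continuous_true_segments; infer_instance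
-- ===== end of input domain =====

-- B replaces A's per-item segment-length state machine with a two-pointer maximal-run scan; alternative decomposition, same cost.


-- ===== PORT A =====
-- A's loop body: state = (continuous_sum, current_segment_length)
def pvStepA (st : Int × Int) (item : Bool) : Int × Int :=
  if item then (st.1, st.2 + 1)
  else (if st.2 > 1 then st.1 + st.2 else st.1, 0)

def sum_continuous_true_segments (lst : List Bool) : Int :=
  let s := lst.foldl pvStepA (0, 0)
  if s.2 > 1 then s.1 + s.2 else s.1

-- ===== PORT B =====
-- B's outer while over the remaining suffix; the inner while (advancing j over the run)
-- is the takeWhile/dropWhile split of the remainder.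
def pvScanB : List Bool → Int → Int
  | [], total => total
  | false :: rest, total => pvScanB rest total
  | true :: rest, total =>
      let run : Int := 1 + (rest.takeWhile id).length
      pvScanB (rest.dropWhile id) (if run > 1 then total + run else total)
termination_by l _ => l.length
decreasing_by
  · simp
  · exact Nat.lt_succ_of_le (rest.length_dropWhile_le id)

def sum_continuous_true_segments_alt (lst : List Bool) : Int := pvScanB lst 0

-- ===== PRECONDITION & SPEC =====
def Spec_sum_continuous_true_segments (lst : List Bool) (out : Int) : Prop := out = sum_continuous_true_segments_alt lst
instance (lst : List Bool) (out : Int) : Decidable (Spec_sum_continuous_true_segments lst out) := by unfold Spec_sum_continuous_true_segments; infer_instance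

-- ===== CLAIM (what is proved, stated in full; the proofs are below) =====
def Claim_equal_sum_continuous_true_segments : Prop := ∀ (lst : List Bool), Dom_sum_continuous_true_segments lst → Spec_sum_continuous_true_segments lst (sum_continuous_true_segments lst)

-- ===== LEMMAS AND PROOFS =====
-- folding A's step over an all-true block just adds its length to the segment counter
theorem pvFoldTrue (ts : List Bool) (h : ∀ b ∈ ts, b = true) (cs cl : Int) :
    List.foldl pvStepA (cs, cl) ts = (cs, cl + ts.length) := by
  induction ts generalizing cl with
  | nil => simp
  | cons b bs ih =>
    have hb : b = true := h b (by simp)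
    subst hb
    have := ih (fun x hx => h x (by simp [hx]))
    simp [pvStepA, this, add_assoc]
    ring

theorem pvDropHead (xs : List Bool) (b : Bool) (bs : List Bool)
    (h : xs.dropWhile id = b :: bs) : b = false := by
  induction xs with
  | nil => simp at h
  | cons x xt ih =>
    by_cases hx : x = true
    · subst hx; simp [List.dropWhile] at h; exact ih h
    · simp at hx; subst hx; simp [List.dropWhile] at h; exact h.1

theorem pvMainAux : ∀ (n : Nat) (lst : List Bool), lst.length ≤ n → ∀ cs : Int,
    (let s := List.foldl pvStepA (cs, 0) lst; if s.2 > 1 then s.1 + s.2 else s.1)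
      = pvScanB lst cs := by
  intro n
  induction n with
  | zero =>
    intro lst h cs
    have : lst = [] := List.eq_nil_of_length_eq_zero (Nat.le_zero.mp h)
    subst this; simp [pvScanB]
  | succ n ih =>
    intro lst hlen cs
    match lst with
    | [] => simp [pvScanB]
    | false :: xs =>
      simp only [List.foldl_cons, pvStepA, pvScanB]
      exact ih xs (by simpa using Nat.le_of_succ_le_succ hlen) cs
    | true :: xs =>
      have hsplit : xs.takeWhile id ++ xs.dropWhile id = xs := xs.takeWhile_append_dropWhile
      have halltrue : ∀ b ∈ xs.takeWhile id, b = true := by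
        intro b hb; simpa using List.mem_takeWhile_imp hb
      have hfold1 : List.foldl pvStepA (cs, 0) (true :: xs)
          = List.foldl pvStepA (cs, 1 + ((xs.takeWhile id).length : Int)) (xs.dropWhile id) := by
        conv_lhs => rw [show (true :: xs) = true :: (xs.takeWhile id ++ xs.dropWhile id) by rw [hsplit]]
        simp only [List.foldl_cons, List.foldl_append, pvStepA]
        rw [pvFoldTrue _ halltrue]
        norm_num
      have hrunB : pvScanB (true :: xs) cs
          = pvScanB (xs.dropWhile id)
              (if 0 < (xs.takeWhile id).length then cs + (1 + ((xs.takeWhile id).length : Int)) else cs) := by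
        simp [pvScanB]
      cases hd : xs.dropWhile id with
      | nil =>
        rw [hrunB, hd]
        simp only [hfold1, hd, List.foldl_nil, pvScanB]
        split_ifs <;> push_cast at * <;> omega
      | cons b bs =>
        have hb : b = false := pvDropHead xs b bs hd
        subst hb
        have hlen2 : bs.length ≤ n := by
          have h1 : (xs.dropWhile id).length ≤ xs.length := xs.length_dropWhile_le id
          rw [hd] at h1; simp at h1 hlen; omega
        rw [hrunB, hd, hfold1, hd]
        simp only [List.foldl_cons, pvStepA, Bool.false_eq_true, if_false]
        simp only [pvScanB]
        rw [← ih bs hlen2]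
        have hC : (if (1 : Int) + ((xs.takeWhile id).length : Int) > 1
                    then cs + (1 + ((xs.takeWhile id).length : Int)) else cs)
                 = (if 0 < (xs.takeWhile id).length
                    then cs + (1 + ((xs.takeWhile id).length : Int)) else cs) := by
          split_ifs <;> push_cast at * <;> omega
        rw [hC]

-- ===== VERDICT (by name: the statement is the Claim_ definition above) =====
theorem sum_continuous_true_segments_spec : Claim_equal_sum_continuous_true_segments := by
  intro lst _
  unfold Spec_sum_continuous_true_segments sum_continuous_true_segments sum_continuous_true_segments_alt
  exact pvMainAux lst.length lst (le_refl _) 0
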